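-- pv_equiv track=rewrite | github.com/Furthen64/RLmini | app/world.py | get_sense_offsets
-- ===== SOURCE A (Python) =====
-- def get_sense_offsets(radius: int) -> list[tuple[int, int]]:
--     """Return sense offsets for a square neighbourhood of the given radius.
--
--     Offsets are ordered row-major (top-left to bottom-right), skipping (0, 0).
--     radius=1 → 8 tiles (3×3 minus centre)
--     radius=2 → 24 tiles (5×5 minus centre)
--     radius=n → (2n+1)² − 1 tiles
--     """
--     offsets: list[tuple[int, int]] = []
--     for dr in range(-radius, radius + 1):
--         for dc in range(-radius, radius + 1):
--             if dr == 0 and dc == 0: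
--                 continue
--             offsets.append((dr, dc))
--     return offsets
-- ===== SOURCE B (Python) =====
-- def get_sense_offsets(radius: int) -> list[tuple[int, int]]:
--     """Row-major square-neighbourhood offsets, centre skipped, via one flat index pass."""
--     if radius < 0:
--         return []
--     side = 2 * radius + 1
--     total = side * side
--     center = total // 2
--     return [(i // side - radius, i % side - radius)
--             for i in range(total) if i != center]
-- ===== Notes on version B (the rewrite author's own statement) =====
-- stated objective: alternative
-- what changed: Replaces the nested dr/dc double loop with a single flat pass over one index range, recovering (dr, dc) by divmod on the side length and skipping the centre by its flat index total//2.
import Mathlib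
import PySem

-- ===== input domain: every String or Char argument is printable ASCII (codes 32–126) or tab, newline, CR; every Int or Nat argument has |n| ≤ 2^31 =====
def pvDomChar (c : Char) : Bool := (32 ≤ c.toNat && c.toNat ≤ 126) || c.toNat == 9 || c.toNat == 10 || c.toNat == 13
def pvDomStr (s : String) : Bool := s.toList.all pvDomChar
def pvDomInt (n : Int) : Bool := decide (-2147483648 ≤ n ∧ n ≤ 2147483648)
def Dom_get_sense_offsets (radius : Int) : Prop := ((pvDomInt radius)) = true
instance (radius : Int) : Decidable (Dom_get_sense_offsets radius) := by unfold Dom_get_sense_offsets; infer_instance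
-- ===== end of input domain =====

-- B replaces A's nested dr/dc double loop by a single flat pass over one index
-- range, recovering (dr, dc) by divmod on the side length and skipping the
-- centre by its flat index (objective: alternative decomposition, same cost).

-- ===== PORT A =====
def get_sense_offsets (radius : Int) : List (Int × Int) :=
  (PySem.List.pyRange (-radius) (radius + 1) 1).foldl
    (fun offsets dr =>
      (PySem.List.pyRange (-radius) (radius + 1) 1).foldl
        (fun offsets dc =>
          if dr = 0 ∧ dc = 0 then offsets else offsets ++ [(dr, dc)])
        offsets)
    []

-- ===== PORT B =====
def get_sense_offsets_alt (radius : Int) : List (Int × Int) :=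
  if radius < 0 then []
  else
    let side := 2 * radius + 1
    let total := side * side
    let center := PySem.Int.floordiv total 2
    (PySem.List.pyRange 0 total 1).foldl
      (fun acc i =>
        if i = center then acc
        else acc ++ [(PySem.Int.floordiv i side - radius, PySem.Int.mod i side - radius)])
      []

-- ===== PRECONDITION & SPEC =====
def Spec_get_sense_offsets (radius : Int) (out : List (Int × Int)) : Prop := out = get_sense_offsets_alt radius
instance (radius : Int) (out : List (Int × Int)) : Decidable (Spec_get_sense_offsets radius out) := by unfold Spec_get_sense_offsets; infer_instance

-- ===== CLAIM (what is proved, stated in full; the proofs are below) =====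
def Claim_equal_get_sense_offsets : Prop := ∀ (radius : Int), Dom_get_sense_offsets radius → Spec_get_sense_offsets radius (get_sense_offsets radius)

-- ===== LEMMAS AND PROOFS =====

-- a 'skip-or-append' fold is a filter+map
theorem pv_foldl_skip {α β : Type} (p : α → Prop) [DecidablePred p] (f : α → β) :
    ∀ (l : List α) (acc : List β),
      l.foldl (fun a x => if p x then a else a ++ [f x]) acc
        = acc ++ (l.filter fun x => decide ¬ p x).map f := by
  intro l
  induction l with
  | nil => intro acc; simp
  | cons x t ih =>
    intro acc
    by_cases h : p x <;> simp [h, ih]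

-- an 'append a block per element' fold is a flatMap
theorem pv_foldl_flat {α β : Type} (g : α → List β) :
    ∀ (l : List α) (acc : List β),
      l.foldl (fun a x => a ++ g x) acc = acc ++ l.flatMap g := by
  intro l
  induction l with
  | nil => intro acc; simp
  | cons x t ih => intro acc; simp [ih]

theorem pv_foldl_fun_congr {α β : Type} {f g : β → α → β} :
    ∀ (l : List α) (acc : β), (∀ a x, f a x = g a x) → l.foldl f acc = l.foldl g acc := by
  intro l
  induction l with
  | nil => intro acc _; rfl
  | cons x t ih => intro acc h; simp only [List.foldl_cons, h]; exact ih _ h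

theorem pv_A_eq (radius : Int) :
    get_sense_offsets radius
      = (PySem.List.pyRange (-radius) (radius + 1) 1).flatMap (fun dr =>
          ((PySem.List.pyRange (-radius) (radius + 1) 1).filter
              (fun dc => decide ¬ (dr = 0 ∧ dc = 0))).map (fun dc => (dr, dc))) := by
  unfold get_sense_offsets
  have h1 : ∀ (dr : Int) (acc : List (Int × Int)),
      (PySem.List.pyRange (-radius) (radius + 1) 1).foldl
        (fun offsets dc => if dr = 0 ∧ dc = 0 then offsets else offsets ++ [(dr, dc)]) acc
      = acc ++ ((PySem.List.pyRange (-radius) (radius + 1) 1).filter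
          (fun dc => decide ¬ (dr = 0 ∧ dc = 0))).map (fun dc => (dr, dc)) := by
    intro dr acc
    exact pv_foldl_skip (fun dc => dr = 0 ∧ dc = 0) (fun dc => (dr, dc)) _ acc
  calc (PySem.List.pyRange (-radius) (radius + 1) 1).foldl
        (fun offsets dr =>
          (PySem.List.pyRange (-radius) (radius + 1) 1).foldl
            (fun offsets dc => if dr = 0 ∧ dc = 0 then offsets else offsets ++ [(dr, dc)]) offsets) []
      = (PySem.List.pyRange (-radius) (radius + 1) 1).foldl
          (fun offsets dr => offsets ++ ((PySem.List.pyRange (-radius) (radius + 1) 1).filter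
              (fun dc => decide ¬ (dr = 0 ∧ dc = 0))).map (fun dc => (dr, dc))) [] := by
        apply pv_foldl_fun_congr
        intro acc dr
        exact h1 dr acc
    _ = _ := by
        rw [pv_foldl_flat]; simp

-- List.range over a product splits into rows
theorem pv_range_mul (n : Nat) : ∀ (m : Nat),
    List.range (m * n) = (List.range m).flatMap (fun q => (List.range n).map (fun j => q * n + j)) := by
  intro m
  induction m with
  | zero => simp
  | succ m ih =>
    rw [Nat.succ_mul, List.range_add, ih, List.range_succ]
    simp

theorem pv_row_div {n : Nat} (q j : Nat) (hj : j < n) : (q * n + j) / n = q := by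
  have hn : 0 < n := by omega
  rw [Nat.mul_comm q n, Nat.mul_add_div hn, Nat.div_eq_of_lt hj]
  omega

theorem pv_row_mod {n : Nat} (q j : Nat) (hj : j < n) : (q * n + j) % n = j := by
  rw [Nat.mul_comm q n, Nat.mul_add_mod, Nat.mod_eq_of_lt hj]

theorem pv_center_unique (m q j : Nat) (hq : q < 2 * m + 1) (hj : j < 2 * m + 1) :
    q * (2 * m + 1) + j = m * (2 * m + 1) + m ↔ q = m ∧ j = m := by
  constructor
  · intro h
    have hm : m < 2 * m + 1 := by omega
    have h1 := pv_row_div (n := 2 * m + 1) q j hj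
    have h2 := pv_row_div (n := 2 * m + 1) m m hm
    rw [h, h2] at h1
    subst h1
    omega
  · rintro ⟨rfl, rfl⟩; rfl

theorem pv_center_val (m : Nat) :
    PySem.Int.floordiv ((2 * (m : Int) + 1) * (2 * (m : Int) + 1)) 2
      = ((m * (2 * m + 1) + m : Nat) : Int) := by
  have h : (2 * (m : Int) + 1) * (2 * (m : Int) + 1)
      = 2 * ((m * (2 * m + 1) + m : Nat) : Int) + 1 := by push_cast; ring
  rw [PySem.Int.floordiv_eq_ediv_of_pos (by omega), h]
  omega

theorem pv_main_nat (m : Nat) : get_sense_offsets (m : Int) = get_sense_offsets_alt (m : Int) := by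
  have hside : (2 * (m : Int) + 1) = ((2 * m + 1 : Nat) : Int) := by push_cast; ring
  have e1 : (((m : Int) + 1) - -(m : Int)).toNat = 2 * m + 1 := by omega
  have hr1 : PySem.List.pyRange (-(m : Int)) ((m : Int) + 1) 1
      = (List.range (2 * m + 1)).map (fun (k : Nat) => -(m : Int) + (k : Int)) := by
    rw [PySem.List.pyRange_one, e1]
  have hc : (2 * (m : Int) + 1) * (2 * (m : Int) + 1) = (((2 * m + 1) * (2 * m + 1) : Nat) : Int) := by
    push_cast; ring
  have hr2 : PySem.List.pyRange 0 ((2 * (m : Int) + 1) * (2 * (m : Int) + 1)) 1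
      = (List.range ((2 * m + 1) * (2 * m + 1))).map (fun (k : Nat) => (0 : Int) + (k : Int)) := by
    rw [PySem.List.pyRange_one]
    rw [sub_zero, hc, Int.toNat_natCast]
  unfold get_sense_offsets_alt
  rw [if_neg (by omega : ¬ ((m : Int) < 0))]
  show get_sense_offsets (m : Int)
      = (PySem.List.pyRange 0 ((2 * (m : Int) + 1) * (2 * (m : Int) + 1)) 1).foldl
          (fun acc i =>
            if i = PySem.Int.floordiv ((2 * (m : Int) + 1) * (2 * (m : Int) + 1)) 2 then acc
            else acc ++ [(PySem.Int.floordiv i (2 * (m : Int) + 1) - (m : Int),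
                          PySem.Int.mod i (2 * (m : Int) + 1) - (m : Int))]) []
  rw [pv_foldl_skip (fun i => i = PySem.Int.floordiv ((2 * (m : Int) + 1) * (2 * (m : Int) + 1)) 2)
        (fun i => (PySem.Int.floordiv i (2 * (m : Int) + 1) - (m : Int),
                   PySem.Int.mod i (2 * (m : Int) + 1) - (m : Int)))]
  rw [pv_A_eq, hr1, hr2, pv_center_val, List.nil_append]
  rw [List.flatMap_map, List.filter_map, List.map_map, pv_range_mul, List.filter_flatMap,
    List.map_flatMap]
  apply List.flatMap_congr
  intro q hq
  have hq' : q < 2 * m + 1 := List.mem_range.mp hq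
  rw [List.filter_map, List.map_map, List.filter_map, List.map_map]
  rw [List.filter_congr (q := (((fun x => decide ¬x = ((m * (2 * m + 1) + m : Nat) : Int)) ∘
        fun (k : Nat) => (0 : Int) + (k : Int)) ∘ fun j => q * (2 * m + 1) + j))]
  · apply List.map_congr_left
    intro j hjf
    have hj' : j < 2 * m + 1 := List.mem_range.mp (List.mem_filter.mp hjf).1
    simp only [Function.comp_apply, zero_add, hside, PySem.Int.floordiv_natCast,
      PySem.Int.mod_natCast, pv_row_div q j hj', pv_row_mod q j hj', Prod.mk.injEq]
    constructor <;> omega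
  · intro j hj
    have hj' : j < 2 * m + 1 := List.mem_range.mp hj
    simp only [Function.comp_apply, zero_add]
    apply decide_eq_decide.mpr
    apply not_congr
    rw [Nat.cast_inj, pv_center_unique m q j hq' hj']
    omega

-- ===== VERDICT (by name: the statement is the Claim_ definition above) =====
theorem get_sense_offsets_spec : Claim_equal_get_sense_offsets := by
  intro radius _
  unfold Spec_get_sense_offsets
  rcases lt_or_ge radius 0 with h | h
  · rw [pv_A_eq, PySem.List.pyRange_one_eq_nil (by omega)]
    unfold get_sense_offsets_alt
    rw [if_pos h]
    rfl
  · obtain ⟨m, rfl⟩ : ∃ m : Nat, radius = (m : Int) := ⟨radius.toNat, (Int.toNat_of_nonneg h).symm⟩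
    exact pv_main_nat m
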